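-- pv_equiv track=rewrite | github.com/ethan-coe-renner/rna-reconstruction | rna.py | get_singletons
-- ===== SOURCE A (Python) =====
-- def break_frag(frag, search):
--     fragments = [""]
--     c = 0
--     for singleteton in frag:
--         fragments[c] += singleteton
--         if singleteton in search:
--             c += 1
--             fragments.insert(c, "")
--     if fragments[-1] == "":
--         return fragments[:-1]
--
--     return fragments
--
-- def is_singleton(fragment, enzyme):
--     bases = break_frag(fragment, enzyme)
--     if len(bases) == 1:
--         return bases[0]
--     return None
--
-- def get_singletons(cu_digest, g_digest):
--     singletons = []
--
--     for frag in cu_digest: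
--         singleton = is_singleton(frag, ['g'])
--         if singleton:
--             singletons.append(singleton)
--
--     for frag in g_digest:
--         singleton = is_singleton(frag, ['c', 'u'])
--         if singleton:
--             singletons.append(singleton)
--
--     return singletons
-- ===== SOURCE B (Python) =====
-- def _keep(frag, cuts):
--     return bool(frag) and not any(b in cuts for b in frag[:-1])
--
-- def get_singletons(cu_digest, g_digest):
--     return [f for f in cu_digest if _keep(f, ('g',))] + \
--            [f for f in g_digest if _keep(f, ('c', 'u'))]
-- ===== Notes on version B (the rewrite author's own statement) =====
-- stated objective: simpler
-- what changed: Drops break_frag/is_singleton entirely: instead of splitting each fragment into pieces at cut sites and counting the pieces, B keeps a fragment iff it is non-empty and no character of frag[:-1] is a cut site, built as two list-comprehension filters.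
import Mathlib
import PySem

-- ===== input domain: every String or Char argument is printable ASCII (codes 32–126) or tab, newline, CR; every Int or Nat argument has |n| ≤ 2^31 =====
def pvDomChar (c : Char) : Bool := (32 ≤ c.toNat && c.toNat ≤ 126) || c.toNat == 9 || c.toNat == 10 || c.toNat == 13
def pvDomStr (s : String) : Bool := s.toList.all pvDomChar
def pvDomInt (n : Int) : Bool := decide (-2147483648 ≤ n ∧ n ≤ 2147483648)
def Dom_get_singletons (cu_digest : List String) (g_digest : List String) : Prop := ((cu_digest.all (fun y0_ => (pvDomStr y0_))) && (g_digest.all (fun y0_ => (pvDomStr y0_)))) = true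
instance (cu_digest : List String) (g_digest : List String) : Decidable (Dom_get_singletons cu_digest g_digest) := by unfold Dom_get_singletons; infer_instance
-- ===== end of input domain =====

-- B replaces A's break-into-pieces construction by a direct scan of frag[:-1] for a cut
-- site (objective: simpler).

-- ===== PORT A =====
-- one iteration of break_frag's loop: fragments[c] += ch; if ch is a cut site, insert "" at c+1.
-- Python's list.insert at index c+1 (always ≤ len(fragments)) is List.insertIdx here.
def aStep (search : List Char) (st : List String × Nat) (ch : Char) : List String × Nat :=
  let fs := st.1.modify st.2 (fun s => s.push ch)
  if ch ∈ search then (fs.insertIdx (st.2 + 1) "", st.2 + 1) else (fs, st.2)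

-- break_frag; fragments is never empty, so fragments[-1] is its getLast? and fragments[:-1] is dropLast
def break_frag (frag : String) (search : List Char) : List String :=
  let st := frag.toList.foldl (aStep search) ([""], 0)
  if st.1.getLast? = some "" then st.1.dropLast else st.1

def is_singleton (fragment : String) (enzyme : List Char) : Option String :=
  let bases := break_frag fragment enzyme
  if bases.length = 1 then some (bases.headD "") else none

def get_singletons (cu_digest : List String) (g_digest : List String) : List String :=
  let s1 := cu_digest.foldl (fun acc frag =>
    match is_singleton frag ['g'] with
    | some s => if s ≠ "" then acc ++ [s] else acc   -- Python truthiness: `if singleton:`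
    | none => acc) []
  g_digest.foldl (fun acc frag =>
    match is_singleton frag ['c', 'u'] with
    | some s => if s ≠ "" then acc ++ [s] else acc
    | none => acc) s1

-- ===== PORT B =====
def keepFrag (frag : String) (cuts : List Char) : Bool :=
  frag != "" && !(frag.toList.dropLast.any (fun b => b ∈ cuts))

def get_singletons_alt (cu_digest : List String) (g_digest : List String) : List String :=
  cu_digest.filter (fun f => keepFrag f ['g']) ++ g_digest.filter (fun f => keepFrag f ['c', 'u'])

-- ===== PRECONDITION & SPEC =====
def Spec_get_singletons (cu_digest : List String) (g_digest : List String) (out : List String) : Prop := out = get_singletons_alt cu_digest g_digest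
instance (cu_digest : List String) (g_digest : List String) (out : List String) : Decidable (Spec_get_singletons cu_digest g_digest out) := by unfold Spec_get_singletons; infer_instance

-- ===== CLAIM (what is proved, stated in full; the proofs are below) =====
def Claim_equal_get_singletons : Prop := ∀ (cu_digest : List String) (g_digest : List String), Dom_get_singletons cu_digest g_digest → Spec_get_singletons cu_digest g_digest (get_singletons cu_digest g_digest)

-- ===== LEMMAS AND PROOFS =====

-- abstract version of A's loop state: finished pieces (as strings) and the current piece (as chars)
def sStep (search : List Char) (st : List String × List Char) (ch : Char) : List String × List Char :=
  if ch ∈ search then (st.1 ++ [String.ofList (st.2 ++ [ch])], []) else (st.1, st.2 ++ [ch])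

-- the bases list break_frag ends up returning, from the abstract state
def basesOf (r : List String × List Char) : List String :=
  if r.2 = [] then r.1 else r.1 ++ [String.ofList r.2]

lemma ofList_push (l : List Char) (c : Char) :
    (String.ofList l).push c = String.ofList (l ++ [c]) := by
  apply String.toList_inj.mp
  simp [String.toList_push]

lemma modify_concat (done : List String) (cur : String) (f : String → String) :
    (done ++ [cur]).modify done.length f = done ++ [f cur] := by
  induction done with
  | nil => simp
  | cons d ds ih => simpa using ih

lemma fold_inv (search : List Char) (l : List Char) :
    ∀ (done : List String) (cur : List Char),
      l.foldl (aStep search) (done ++ [String.ofList cur], done.length) =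
        ((l.foldl (sStep search) (done, cur)).1 ++
            [String.ofList (l.foldl (sStep search) (done, cur)).2],
          (l.foldl (sStep search) (done, cur)).1.length) := by
  induction l with
  | nil => intro done cur; rfl
  | cons ch rest ih =>
    intro done cur
    rw [List.foldl_cons, List.foldl_cons]
    simp only [aStep, sStep, modify_concat, ofList_push]
    by_cases h : ch ∈ search
    · simp only [h, if_pos]
      have hlen : done.length + 1 = (done ++ [String.ofList (cur ++ [ch])]).length := by simp
      rw [hlen, List.insertIdx_length_self]
      have := ih (done ++ [String.ofList (cur ++ [ch])]) []
      simpa using this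
    · simp only [h, if_false]
      exact ih done (cur ++ [ch])

-- the finished-pieces prefix of the abstract state is only ever appended to
lemma sfold_prefix (search : List Char) (l : List Char) :
    ∀ (done : List String) (cur : List Char),
      l.foldl (sStep search) (done, cur) =
        (done ++ (l.foldl (sStep search) ([], cur)).1,
          (l.foldl (sStep search) ([], cur)).2) := by
  induction l with
  | nil => intro done cur; simp
  | cons ch rest ih =>
    intro done cur
    rw [List.foldl_cons, List.foldl_cons]
    simp only [sStep, List.nil_append]
    by_cases h : ch ∈ search
    · simp only [h, if_pos]
      rw [ih (done ++ [String.ofList (cur ++ [ch])]) [], ih [String.ofList (cur ++ [ch])] []]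
      simp
    · simp only [h, if_false]
      exact ih done (cur ++ [ch])

-- when no character of l is a cut site, the whole of l joins the current piece
lemma sfold_no_cut (search : List Char) (l : List Char)
    (h : ∀ c ∈ l, c ∉ search) :
    ∀ (done : List String) (cur : List Char),
      l.foldl (sStep search) (done, cur) = (done, cur ++ l) := by
  induction l with
  | nil => intro done cur; simp
  | cons ch rest ih =>
    intro done cur
    have hch : ch ∉ search := h ch (by simp)
    rw [List.foldl_cons]
    simp only [sStep, hch, if_false]
    rw [ih (fun c hc => h c (by simp [hc])) done (cur ++ [ch])]
    simp

-- any nonempty input produces at least one base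
lemma bases_pos (search : List Char) (l : List Char) (hl : l ≠ []) :
    ∀ cur : List Char, 1 ≤ (basesOf (l.foldl (sStep search) ([], cur))).length := by
  induction l with
  | nil => exact absurd rfl hl
  | cons ch rest ih =>
    intro cur
    rw [List.foldl_cons]
    simp only [sStep, List.nil_append]
    by_cases h : ch ∈ search
    · simp only [h, if_pos]
      rw [sfold_prefix search rest [String.ofList (cur ++ [ch])] []]
      unfold basesOf
      split <;> simp
    · simp only [h, if_false]
      rcases rest with _ | ⟨r, rs⟩
      · simp [basesOf]
      · exact ih (by simp) (cur ++ [ch])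

-- a cut site strictly before the last character forces at least two bases
lemma bases_two (search : List Char) (l : List Char)
    (h : ∃ c ∈ l.dropLast, c ∈ search) :
    ∀ cur : List Char, 2 ≤ (basesOf (l.foldl (sStep search) ([], cur))).length := by
  induction l with
  | nil => simp at h
  | cons ch rest ih =>
    intro cur
    have hrest : rest ≠ [] := by
      rintro rfl; simp at h
    rw [List.foldl_cons]
    simp only [sStep, List.nil_append]
    by_cases hc : ch ∈ search
    · simp only [hc, if_pos]
      rw [sfold_prefix search rest [String.ofList (cur ++ [ch])] []]
      have h1 := bases_pos search rest hrest ([] : List Char)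
      unfold basesOf at h1 ⊢
      by_cases hsp : (rest.foldl (sStep search) ([], ([] : List Char))).2 = []
      · simp [hsp] at h1 ⊢; try omega
      · simp [hsp] at h1 ⊢; try omega
    · simp only [hc, if_false]
      apply ih
      rcases h with ⟨c, hcmem, hcs⟩
      rcases rest with _ | ⟨r, rs⟩
      · exact absurd rfl hrest
      simp only [List.dropLast_cons₂, List.mem_cons] at hcmem
      rcases hcmem with rfl | hcmem
      · exact absurd hcs hc
      · exact ⟨c, hcmem, hcs⟩

-- break_frag in terms of the abstract state
lemma break_frag_eq (frag : String) (search : List Char) :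
    break_frag frag search = basesOf (frag.toList.foldl (sStep search) ([], [])) := by
  unfold break_frag
  have h := fold_inv search frag.toList [] []
  simp only [List.nil_append, List.length_nil] at h
  have h0 : (""  : String) = String.ofList [] := rfl
  rw [h0, h]
  unfold basesOf
  by_cases h2 : (frag.toList.foldl (sStep search) ([], [])).2 = []
  · simp [h2]
  · have : String.ofList (frag.toList.foldl (sStep search) ([], [])).2 ≠ "" := by
      intro hh
      exact h2 (by simpa using String.ofList_inj.mp (by simpa using hh))
    simp [this, h2]

-- the characterisation: is_singleton returns the fragment iff keepFrag holds
lemma is_singleton_eq (frag : String) (enzyme : List Char) :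
    is_singleton frag enzyme = if keepFrag frag enzyme then some frag else none := by
  unfold is_singleton keepFrag
  rw [break_frag_eq]
  by_cases hnil : frag.toList = []
  · have hfe : frag = "" := String.toList_eq_nil_iff.mp hnil
    simp [hfe, basesOf]
  · by_cases hcut : ∃ c ∈ frag.toList.dropLast, c ∈ enzyme
    · have h2 := bases_two enzyme frag.toList hcut ([] : List Char)
      have hany : frag.toList.dropLast.any (fun b => b ∈ enzyme) = true := by
        rcases hcut with ⟨c, hm, hc⟩
        exact List.any_eq_true.mpr ⟨c, hm, by simpa using hc⟩
      simp only [hany, Bool.not_true, Bool.and_false]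
      split
      · rename_i hlen; omega
      · simp
    · -- no cut before the last char: exactly one base, namely frag itself
      obtain ⟨l', x, hx⟩ := (List.eq_nil_or_concat frag.toList).resolve_left hnil
      rw [List.concat_eq_append] at hx
      have hdrop : frag.toList.dropLast = l' := by rw [hx]; simp
      have hnc : ∀ c ∈ l', c ∉ enzyme := by
        intro c hc hcin
        exact hcut ⟨c, by rw [hdrop]; exact hc, hcin⟩
      have hfold : frag.toList.foldl (sStep enzyme) ([], []) =
          if x ∈ enzyme then ([String.ofList (l' ++ [x])], ([] : List Char))
          else ([], l' ++ [x]) := by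
        rw [hx, List.foldl_append, sfold_no_cut enzyme l' hnc [] []]
        simp only [List.foldl_cons, List.foldl_nil, sStep, List.nil_append]
      have hne : frag != "" := by
        simp only [bne_iff_ne, ne_eq]
        intro hh; exact hnil (by rw [hh]; rfl)
      have hofl : String.ofList (l' ++ [x]) = frag := by
        rw [← hx]
        exact (String.ofList_toList : String.ofList frag.toList = frag)
      have hany : frag.toList.dropLast.any (fun b => b ∈ enzyme) = false := by
        rw [hdrop]
        simp only [List.any_eq_false]
        intro c hc; simpa using hnc c hc
      rw [hfold]
      split <;> simp [basesOf, hofl, hne, hany]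

-- one pass of A's accumulation loop equals append-filter
lemma loop_filter (cuts : List Char) (l : List String) :
    ∀ acc : List String,
      l.foldl (fun acc frag =>
        match is_singleton frag cuts with
        | some s => if s ≠ "" then acc ++ [s] else acc
        | none => acc) acc = acc ++ l.filter (fun f => keepFrag f cuts) := by
  induction l with
  | nil => intro acc; simp
  | cons frag rest ih =>
    intro acc
    rw [List.foldl_cons, List.filter_cons]
    by_cases hk : keepFrag frag cuts
    · have hne : frag ≠ "" := by
        unfold keepFrag at hk
        simp only [Bool.and_eq_true, bne_iff_ne, ne_eq] at hk
        exact hk.1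
      have hstep : (match is_singleton frag cuts with
          | some s => if s ≠ "" then acc ++ [s] else acc
          | none => acc) = acc ++ [frag] := by
        rw [is_singleton_eq]
        simp [hk, hne]
      rw [hstep, ih, hk]
      simp
    · have hstep : (match is_singleton frag cuts with
          | some s => if s ≠ "" then acc ++ [s] else acc
          | none => acc) = acc := by
        rw [is_singleton_eq]
        simp [hk]
      rw [hstep, ih]
      simp only [Bool.not_eq_true] at hk
      simp [hk]

-- ===== VERDICT (by name: the statement is the Claim_ definition above) =====
theorem get_singletons_spec : Claim_equal_get_singletons := by
  intro cu_digest g_digest _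
  unfold Spec_get_singletons get_singletons get_singletons_alt
  rw [loop_filter, loop_filter]
  simp
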